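-- pv_equiv track=rewrite | github.com/cirosantilli/project-euler-solvers | solvers/133.py | solve
-- ===== SOURCE A (Python) =====
-- def powmod(base: int, exponent: int, modulo: int) -> int:
--     return pow(base, exponent, modulo)
--
-- def solve(max_prime: int) -> int:
--     digits = 10000000000000000000
--     total = 0
--     primes = []
--     for i in range(2, max_prime):
--         is_prime = True
--         for p in primes:
--             if p * p > i:
--                 break
--             if i % p == 0:
--                 is_prime = False
--                 break
--         if not is_prime:
--             continue
--         primes.append(i)
--
--         modulo = 9 * i
--         remainder = powmod(10, digits, modulo)
--         if remainder != 1: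
--             total += i
--     return total
-- ===== SOURCE B (Python) =====
-- def solve(max_prime: int) -> int:
--     digits = 10000000000000000000
--     if max_prime <= 2:
--         return 0
--     n = max_prime
--     sieve = [True] * n
--     sieve[0] = False
--     sieve[1] = False
--     i = 2
--     while i * i < n:
--         if sieve[i]:
--             j = i * i
--             while j < n:
--                 sieve[j] = False
--                 j += i
--         i += 1
--     total = 0
--     for p in range(2, n):
--         if sieve[p]:
--             if pow(10, digits, 9 * p) != 1:
--                 total += p
--     return total
-- ===== Notes on version B (the rewrite author's own statement) =====
-- stated objective: faster
-- what changed: Prime generation by incremental trial division against a maintained primes list is replaced by a Sieve of Eratosthenes boolean array, then one pass sums the primes whose modpow test fails.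
import Mathlib
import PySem

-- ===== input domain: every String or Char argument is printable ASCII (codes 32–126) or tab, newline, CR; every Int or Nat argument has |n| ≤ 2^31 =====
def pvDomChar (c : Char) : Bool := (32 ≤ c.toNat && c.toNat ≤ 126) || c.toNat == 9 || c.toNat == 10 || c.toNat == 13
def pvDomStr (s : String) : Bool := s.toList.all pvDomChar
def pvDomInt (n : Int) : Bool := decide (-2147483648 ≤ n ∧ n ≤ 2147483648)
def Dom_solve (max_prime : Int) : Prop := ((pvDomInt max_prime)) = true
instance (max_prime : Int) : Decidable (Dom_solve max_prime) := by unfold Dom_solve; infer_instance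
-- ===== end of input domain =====

-- B replaces A's trial-division prime generation by a Sieve of Eratosthenes (faster); same return value.

-- ===== PORT A =====
-- Python's built-in pow(b, e, m), ported by hand as binary exponentiation (PySem.Int.powMod
-- computes b^e first, which is infeasible for e = 10^19); exact for the arguments both
-- programs pass it: b = 10 ≥ 0, e = 10^19 ≥ 0, m = 9*i > 0.  Shared by both ports, as both
-- Pythons call the same built-in.
def pypowNat (b e m : Nat) : Nat :=
  if h : e = 0 then 1 % m
  else
    let h2 := pypowNat b (e / 2) m * pypowNat b (e / 2) m % m
    if e % 2 = 0 then h2 else h2 * b % m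
termination_by e
decreasing_by all_goals exact Nat.div_lt_self (Nat.pos_of_ne_zero h) (by omega)

def powmod (base exponent modulo : Int) : Int :=
  ((pypowNat base.toNat exponent.toNat modulo.toNat : Nat) : Int)

-- the inner 'for p in primes: …' loop with its two breaks
def trialLoop (i : Int) : List Int → Bool
  | [] => true
  | p :: ps =>
    if p * p > i then true
    else if PySem.Int.mod i p = 0 then false
    else trialLoop i ps

def solve (max_prime : Int) : Int :=
  let digits : Int := 10000000000000000000
  ((PySem.List.pyRange 2 max_prime 1).foldl (fun (st : Int × List Int) i =>
    if trialLoop i st.2 then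
      let primes := st.2 ++ [i]
      if powmod 10 digits (9 * i) ≠ 1 then (st.1 + i, primes) else (st.1, primes)
    else st) (0, [])).1

-- ===== PORT B =====
-- 'j = i*i; while j < n: sieve[j] = False; j += i'
def markMults (n i : Nat) (hi : 0 < i) (j : Nat) (s : List Bool) : List Bool :=
  if _h : j < n then markMults n i hi (j + i) (s.set j false) else s
termination_by n - j
decreasing_by omega

-- 'i = 2; while i*i < n: if sieve[i]: mark multiples; i += 1'
def sieveLoop (n i : Nat) (hi : 0 < i) (s : List Bool) : List Bool :=
  if h : i * i < n then
    sieveLoop n (i + 1) (by omega) (if s.getD i false then markMults n i hi (i * i) s else s)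
  else s
termination_by n - i
decreasing_by have : i ≤ i * i := Nat.le_mul_of_pos_left i hi; omega

def solve_alt (max_prime : Int) : Int :=
  if max_prime ≤ 2 then 0
  else
    let digits : Int := 10000000000000000000
    let n := max_prime.toNat
    let sieve := sieveLoop n 2 (by omega) (((List.replicate n true).set 0 false).set 1 false)
    (PySem.List.pyRange 2 max_prime 1).foldl (fun total p =>
      if sieve.getD p.toNat false then
        if powmod 10 digits (9 * p) ≠ 1 then total + p else total
      else total) 0

-- ===== PRECONDITION & SPEC =====
def Spec_solve (max_prime : Int) (out : Int) : Prop := out = solve_alt max_prime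
instance (max_prime : Int) (out : Int) : Decidable (Spec_solve max_prime out) := by unfold Spec_solve; infer_instance

-- ===== CLAIM (what is proved, stated in full; the proofs are below) =====
def Claim_equal_solve : Prop := ∀ (max_prime : Int), Dom_solve max_prime → Spec_solve max_prime (solve max_prime)

-- ===== LEMMAS AND PROOFS =====

-- the common value: the summand of both programs for the loop index i
def gfun (i : Int) : Int :=
  if Nat.Prime i.toNat ∧ powmod 10 10000000000000000000 (9 * i) ≠ 1 then i else 0

def sumUpTo (k : Nat) : Int := ((List.range k).map (fun t : Nat => gfun (2 + (t : Int)))).sum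

def primesUpTo (k : Nat) : List Int :=
  ((List.range k).map (fun t : Nat => (2 + (t : Int)))).filter (fun i => decide (Nat.Prime i.toNat))

-- "m was crossed out by some prime < k"
def Marked (k m : Nat) : Prop := ∃ p, Nat.Prime p ∧ p < k ∧ p ∣ m ∧ p * p ≤ m

theorem trialLoop_true (i : Int) (l : List Int)
    (h : ∀ p ∈ l, ¬ PySem.Int.mod i p = 0) : trialLoop i l = true := by
  induction l with
  | nil => rfl
  | cons p ps ih =>
    have hp := h p (by simp)
    unfold trialLoop
    by_cases hb : p * p > i
    · simp [hb]
    · simp only [if_neg hb, if_neg hp]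
      exact ih (fun q hq => h q (by simp [hq]))

theorem trialLoop_false (i : Int) (l : List Int)
    (hsort : l.Pairwise (· < ·)) (hpos : ∀ p ∈ l, 0 ≤ p)
    (w : Int) (hw : w ∈ l) (hw2 : w * w ≤ i) (hwd : PySem.Int.mod i w = 0) :
    trialLoop i l = false := by
  induction l with
  | nil => simp at hw
  | cons p ps ih =>
    unfold trialLoop
    rcases List.mem_cons.mp hw with rfl | hw'
    · rw [if_neg (by omega), if_pos hwd]
    · have hpw : p < w := (List.pairwise_cons.mp hsort).1 w hw'
      have hp0 : 0 ≤ p := hpos p (by simp)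
      have : p * p < w * w := by nlinarith
      rw [if_neg (by omega)]
      by_cases hm : PySem.Int.mod i p = 0
      · rw [if_pos hm]
      · rw [if_neg hm]
        exact ih (List.pairwise_cons.mp hsort).2 (fun q hq => hpos q (by simp [hq])) hw' 

theorem trialLoop_eq (i : Int) (hi : 2 ≤ i) (l : List Int)
    (hmem : ∀ x ∈ l, 2 ≤ x ∧ x < i ∧ Nat.Prime x.toNat)
    (hsort : l.Pairwise (· < ·))
    (hcomp : ∀ q : Nat, Nat.Prime q → (q : Int) < i → (q : Int) ∈ l) :
    trialLoop i l = decide (Nat.Prime i.toNat) := by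
  by_cases hp : Nat.Prime i.toNat
  · rw [decide_eq_true hp]
    apply trialLoop_true
    intro p hpl hmod
    obtain ⟨h2p, hlt, _⟩ := hmem p hpl
    have hdvd : p ∣ i := (PySem.Int.mod_eq_zero_iff_dvd i p).mp hmod
    have hdn : p.toNat ∣ i.toNat :=
      Int.natCast_dvd_natCast.mp
        (by rwa [Int.toNat_of_nonneg (by omega : (0:Int) ≤ p),
                 Int.toNat_of_nonneg (by omega : (0:Int) ≤ i)])
    rcases hp.eq_one_or_self_of_dvd p.toNat hdn with h1 | h1 <;> omega
  · rw [decide_eq_false hp]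
    have h1 : i.toNat ≠ 1 := by omega
    have hqp : Nat.Prime i.toNat.minFac := Nat.minFac_prime h1
    have hqd : i.toNat.minFac ∣ i.toNat := Nat.minFac_dvd _
    have hqs : i.toNat.minFac * i.toNat.minFac ≤ i.toNat := by
      have := Nat.minFac_sq_le_self (by omega) hp; nlinarith [this]
    have hq2 : 2 ≤ i.toNat.minFac := hqp.two_le
    have hql : (i.toNat.minFac : Int) < i := by
      have : i.toNat.minFac < i.toNat := by nlinarith
      omega
    apply trialLoop_false i l hsort (fun p h => by have := (hmem p h).1; omega)
      (i.toNat.minFac : Int) (hcomp _ hqp hql)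
    · omega
    · exact (PySem.Int.mod_eq_zero_iff_dvd i _).mpr
        (by rw [show i = (i.toNat : Int) by omega]; exact_mod_cast hqd)

theorem primesUpTo_sorted (k : Nat) : (primesUpTo k).Pairwise (· < ·) := by
  unfold primesUpTo
  refine List.Pairwise.filter _ ?_
  rw [List.pairwise_map]
  exact List.pairwise_lt_range.imp (by intro a b hab; omega)

theorem primesUpTo_mem_iff (k : Nat) (x : Int) :
    x ∈ primesUpTo k ↔ (∃ t, t < k ∧ 2 + (t : Int) = x) ∧ Nat.Prime x.toNat := by
  simp [primesUpTo, List.mem_filter, List.mem_map, List.mem_range]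

theorem sumUpTo_succ (k : Nat) : sumUpTo (k + 1) = sumUpTo k + gfun (2 + (k : Int)) := by
  simp [sumUpTo, List.range_succ]

theorem primesUpTo_succ_prime (k : Nat) (hp : Nat.Prime ((2 : Int) + (k : Nat)).toNat) :
    primesUpTo (k + 1) = primesUpTo k ++ [2 + (k : Int)] := by
  unfold primesUpTo
  rw [List.range_succ, List.map_append, List.filter_append]
  simp [hp]

theorem primesUpTo_succ_not_prime (k : Nat) (hp : ¬ Nat.Prime ((2 : Int) + (k : Nat)).toNat) :
    primesUpTo (k + 1) = primesUpTo k := by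
  unfold primesUpTo
  rw [List.range_succ, List.map_append, List.filter_append]
  simp [hp]

theorem A_fold (k : Nat) :
    (PySem.List.pyRange 2 (2 + (k : Nat) : Int) 1).foldl
      (fun (st : Int × List Int) i =>
        if trialLoop i st.2 then
          if powmod 10 10000000000000000000 (9 * i) ≠ 1 then (st.1 + i, st.2 ++ [i])
          else (st.1, st.2 ++ [i])
        else st) (0, []) = (sumUpTo k, primesUpTo k) := by
  induction k with
  | zero =>
    rw [show ((2 : Int) + ((0 : Nat) : Int)) = 2 by norm_num,
        PySem.List.pyRange_one_eq_nil (by norm_num)]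
    simp [sumUpTo, primesUpTo]
  | succ k ih =>
    rw [show ((2 : Int) + ((k + 1 : Nat) : Int)) = (2 + (k : Nat) : Int) + 1 by push_cast; ring,
        PySem.List.pyRange_one_succ_right (by omega), List.foldl_append, ih]
    simp only [List.foldl_cons, List.foldl_nil]
    have htl : trialLoop (2 + (k : Int)) (primesUpTo k) =
        decide (Nat.Prime ((2 : Int) + (k : Nat)).toNat) := by
      apply trialLoop_eq _ (by omega) _ ?_ (primesUpTo_sorted k)
      · intro q hq hql
        rw [primesUpTo_mem_iff]
        have hq2 := hq.two_le
        refine ⟨⟨q - 2, by omega, by omega⟩, ?_⟩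
        rwa [Int.toNat_natCast]
      · intro x hx
        obtain ⟨⟨t, ht, rfl⟩, hpr⟩ := (primesUpTo_mem_iff k x).mp hx
        exact ⟨by omega, by omega, hpr⟩
    rw [htl]
    by_cases hp : Nat.Prime ((2 : Int) + (k : Nat)).toNat
    · rw [decide_eq_true hp]
      simp only [if_true]
      rw [sumUpTo_succ, primesUpTo_succ_prime k hp]
      by_cases hc : powmod 10 10000000000000000000 (9 * (2 + (k : Int))) ≠ 1
      · rw [if_pos hc]
        unfold gfun
        rw [if_pos ⟨hp, hc⟩]
      · rw [if_neg hc]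
        unfold gfun
        rw [if_neg (by rintro ⟨_, hcc⟩; exact hc hcc)]
        simp
    · rw [decide_eq_false hp]
      simp only [Bool.false_eq_true, if_false]
      rw [sumUpTo_succ, primesUpTo_succ_not_prime k hp]
      unfold gfun
      rw [if_neg (by rintro ⟨hpp, _⟩; exact hp hpp)]
      simp

theorem solve_eq_sum (mp : Int) (h : 2 ≤ mp) : solve mp = sumUpTo (mp - 2).toNat := by
  have hA := A_fold (mp - 2).toNat
  rw [show ((2 : Int) + (((mp - 2).toNat : Nat) : Int)) = mp by omega] at hA
  unfold solve
  simp only []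
  rw [hA]

theorem markMults_length (n i : Nat) (hi : 0 < i) (j : Nat) (s : List Bool) :
    (markMults n i hi j s).length = s.length := by
  suffices H : ∀ fuel j s, n - j ≤ fuel → (markMults n i hi j s).length = s.length from
    H (n - j) j s le_rfl
  intro fuel
  induction fuel with
  | zero => intro j s hf; unfold markMults; rw [dif_neg (by omega)]
  | succ f ih =>
    intro j s hf
    unfold markMults
    by_cases h : j < n
    · rw [dif_pos h, ih (j + i) _ (by omega), List.length_set]
    · rw [dif_neg h]

theorem markMults_getD (n i : Nat) (hi : 0 < i) (j m : Nat) (s : List Bool)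
    (hlen : s.length = n) :
    (markMults n i hi j s).getD m false =
      if (∃ t ≤ m, m = j + i * t) ∧ m < n then false else s.getD m false := by
  induction hfuel : n - j using Nat.strong_induction_on generalizing j s with
  | _ fuel ih =>
  unfold markMults
  by_cases h : j < n
  · rw [dif_pos h]
    have hlen' : (s.set j false).length = n := by rw [List.length_set]; exact hlen
    rcases fuel with _ | f
    · omega
    rw [ih (n - (j + i)) (by omega) (j + i) (s.set j false) hlen' rfl]
    by_cases hmn : m < n
    · by_cases hmj : m = j
      · subst hmj
        rw [if_neg (by rintro ⟨⟨t, _, ht⟩, _⟩; omega), if_pos ⟨⟨0, by omega⟩, hmn⟩]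
        simp [List.getD_eq_getElem?_getD, hlen ▸ h]
      · have hset : (s.set j false).getD m false = s.getD m false := by
          simp [List.getD_eq_getElem?_getD, List.getElem?_set_ne (by omega : j ≠ m)]
        rw [hset]
        by_cases hc : ∃ t ≤ m, m = j + i * t
        · obtain ⟨t, htm, ht⟩ := hc
          rcases t with _ | t
          · omega
          · have hmul : i * (t + 1) = i * t + i := by ring
            rw [if_pos ⟨⟨t, by omega, by omega⟩, hmn⟩, if_pos ⟨⟨t + 1, htm, ht⟩, hmn⟩]
        · rw [if_neg (by
                rintro ⟨⟨t, htm, ht⟩, _⟩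
                have hmul : i * (t + 1) = i * t + i := by ring
                have hit : t ≤ i * t := Nat.le_mul_of_pos_left t hi
                exact hc ⟨t + 1, by omega, by omega⟩),
              if_neg (by rintro ⟨ht, _⟩; exact hc ht)]
    · rw [if_neg (by rintro ⟨_, h'⟩; omega), if_neg (by rintro ⟨_, h'⟩; omega)]
      simp [List.getD_eq_getElem?_getD, List.getElem?_set_ne (by omega : j ≠ m)]
  · rw [dif_neg h, if_neg (by rintro ⟨⟨t, _, rfl⟩, hmn⟩; omega)]

theorem sieveLoop_getD (n : Nat) (i : Nat) (hi : 0 < i) (s : List Bool) (h2 : 2 ≤ i)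
    (hlen : s.length = n)
    (hInv : ∀ m, m < n → (s.getD m false = true ↔ 2 ≤ m ∧ ¬ Marked i m)) :
    ∀ m, m < n → ((sieveLoop n i hi s).getD m false = true ↔ 2 ≤ m ∧ Nat.Prime m) := by
  induction hfuel : n - i using Nat.strong_induction_on generalizing i s with
  | _ fuel ih =>
  unfold sieveLoop
  by_cases hlt : i * i < n
  · rw [dif_pos hlt]
    have hii : i ≤ i * i := Nat.le_mul_of_pos_left i hi
    have hin : i < n := by omega
    by_cases hsi : s.getD i false = true
    · rw [if_pos hsi]
      obtain ⟨h2i, hnm⟩ := (hInv i hin).mp hsi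
      have hip : Nat.Prime i := by
        by_contra hnp
        have hq2 : 2 ≤ i.minFac := (Nat.minFac_prime (by omega)).two_le
        have hqs : i.minFac * i.minFac ≤ i := by
          have := Nat.minFac_sq_le_self (by omega) hnp; nlinarith [this]
        have hqlt : i.minFac < i := by nlinarith
        exact hnm ⟨i.minFac, Nat.minFac_prime (by omega), hqlt, Nat.minFac_dvd i, hqs⟩
      refine ih (n - (i + 1)) (by omega) (i + 1) (by omega) _ (by omega) ?_ ?_ rfl
      · rw [markMults_length]; exact hlen
      · intro m hm
        rw [markMults_getD n i hi (i * i) m s hlen]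
        by_cases hc : ∃ t ≤ m, m = i * i + i * t
        · rw [if_pos ⟨hc, hm⟩]
          refine iff_of_false (by simp) ?_
          rintro ⟨_, hnm'⟩
          obtain ⟨t, htm, ht⟩ := hc
          have hmul : i * (i + t) = i * i + i * t := by ring
          exact hnm' ⟨i, hip, by omega, ⟨i + t, by omega⟩, by omega⟩
        · rw [if_neg (by rintro ⟨hc', _⟩; exact hc hc')]
          rw [hInv m hm]
          constructor
          · rintro ⟨h2, hnm'⟩
            refine ⟨h2, ?_⟩
            rintro ⟨p, pp, plt, pd, pss⟩
            rcases Nat.lt_succ_iff_lt_or_eq.mp plt with h' | rfl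
            · exact hnm' ⟨p, pp, h', pd, pss⟩
            · obtain ⟨c, rfl⟩ := pd
              have hic : p ≤ c := by nlinarith
              have hle : c - p ≤ p * c := by
                have := Nat.le_mul_of_pos_left c hi; omega
              have heq : p * c = p * p + p * (c - p) := by
                have hci : c = p + (c - p) := by omega
                calc p * c = p * (p + (c - p)) := by rw [← hci]
                  _ = p * p + p * (c - p) := by ring
              exact hc ⟨c - p, hle, heq⟩
          · rintro ⟨h2, hnm'⟩
            exact ⟨h2, fun ⟨p, pp, plt, pd, pss⟩ => hnm' ⟨p, pp, by omega, pd, pss⟩⟩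
    · rw [if_neg hsi]
      have hm_i : Marked i i := by
        by_contra hno
        exact hsi ((hInv i hin).mpr ⟨h2, hno⟩)
      obtain ⟨p, pp, plt, pd, pss⟩ := hm_i
      have hnp : ¬ Nat.Prime i := by
        intro hip
        rcases hip.eq_one_or_self_of_dvd p pd with h1 | h1 <;> (have := pp.two_le; omega)
      refine ih (n - (i + 1)) (by omega) (i + 1) (by omega) s (by omega) hlen ?_ rfl
      intro m hm
      rw [hInv m hm]
      constructor
      · rintro ⟨h2m, hnm'⟩
        refine ⟨h2m, ?_⟩
        rintro ⟨q, qp, qlt, qd, qss⟩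
        rcases Nat.lt_succ_iff_lt_or_eq.mp qlt with h' | rfl
        · exact hnm' ⟨q, qp, h', qd, qss⟩
        · exact hnp qp
      · rintro ⟨h2m, hnm'⟩
        exact ⟨h2m, fun ⟨q, qp, qlt, qd, qss⟩ => hnm' ⟨q, qp, by omega, qd, qss⟩⟩
  · rw [dif_neg hlt]
    intro m hm
    rw [hInv m hm]
    constructor
    · rintro ⟨h2m, hnm'⟩
      refine ⟨h2m, ?_⟩
      by_contra hnp
      have hq2 : 2 ≤ m.minFac := (Nat.minFac_prime (by omega)).two_le
      have hqs : m.minFac * m.minFac ≤ m := by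
        have := Nat.minFac_sq_le_self (by omega) hnp; nlinarith [this]
      have hqi : m.minFac < i := by nlinarith
      exact hnm' ⟨m.minFac, Nat.minFac_prime (by omega), hqi, Nat.minFac_dvd m, hqs⟩
    · rintro ⟨h2m, hmp⟩
      refine ⟨h2m, ?_⟩
      rintro ⟨p, pp, plt, pd, pss⟩
      rcases hmp.eq_one_or_self_of_dvd p pd with h1 | h1
      · exact absurd h1 (by have := pp.two_le; omega)
      · subst h1
        have := pp.two_le; nlinarith

theorem solve_alt_eq_sum (mp : Int) (h : 2 < mp) : solve_alt mp = sumUpTo (mp - 2).toNat := by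
  have hn3 : 3 ≤ mp.toNat := by omega
  have hlen0 : (((List.replicate mp.toNat true).set 0 false).set 1 false).length = mp.toNat := by
    simp
  have hInv0 : ∀ m, m < mp.toNat →
      ((((List.replicate mp.toNat true).set 0 false).set 1 false).getD m false = true ↔
        2 ≤ m ∧ ¬ Marked 2 m) := by
    intro m hm
    have hnomark : ¬ Marked 2 m := by
      rintro ⟨p, pp, plt, _, _⟩; have := pp.two_le; omega
    match m with
    | 0 =>
      simp [List.getD_eq_getElem?_getD, hm]
    | 1 =>
      simp [List.getD_eq_getElem?_getD, hm]
    | (m + 2) =>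
      simp [List.getD_eq_getElem?_getD, hm, hnomark]
  have hchar := sieveLoop_getD mp.toNat 2 (by omega) _ (by omega) hlen0 hInv0
  unfold solve_alt
  rw [if_neg (by omega)]
  simp only []
  refine Eq.trans (PySem.List.foldl_congr_mem _ _ (fun (total p : Int) => total + gfun p) _ ?_) ?_
  case refine_2 =>
    rw [PySem.List.foldl_add, PySem.List.pyRange_one 2 mp, List.map_map, zero_add]
    rfl
  · intro acc p hp
    obtain ⟨hp2, hplt⟩ := (PySem.List.mem_pyRange_one).mp hp
    have hpn : p.toNat < mp.toNat := by omega
    have hiff := hchar p.toNat hpn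
    by_cases hpr : Nat.Prime p.toNat
    · rw [if_pos (hiff.mpr ⟨by omega, hpr⟩)]
      by_cases hc : powmod 10 10000000000000000000 (9 * p) ≠ 1
      · rw [if_pos hc]
        show acc + p = acc + gfun p
        unfold gfun
        rw [if_pos ⟨hpr, hc⟩]
      · rw [if_neg hc]
        show acc = acc + gfun p
        unfold gfun
        rw [if_neg (by rintro ⟨_, hcc⟩; exact hc hcc)]
        simp
    · rw [if_neg (fun ht => hpr (hiff.mp ht).2)]
      show acc = acc + gfun p
      unfold gfun
      rw [if_neg (by rintro ⟨hpp, _⟩; exact hpr hpp)]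
      simp

-- ===== VERDICT (by name: the statement is the Claim_ definition above) =====
theorem solve_spec : Claim_equal_solve := by
  intro mp _
  unfold Spec_solve
  by_cases h : mp ≤ 2
  · have h1 : solve_alt mp = 0 := by unfold solve_alt; simp [h]
    have h2 : solve mp = 0 := by
      unfold solve
      rw [PySem.List.pyRange_one_eq_nil (by omega)]
      rfl
    rw [h1, h2]
  · rw [solve_eq_sum mp (by omega), solve_alt_eq_sum mp (by omega)]
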